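-- pv_equiv track=rewrite | github.com/RuiWu-yes/leetcode | Python/Data Structure/Array/Common/*合并k个有序数组.py | sortNArray2
-- ===== SOURCE A (Python) =====
-- from typing import List
-- import heapq
--
-- def sortNArray2(nums: List[List[int]]) -> List:
--     heap = []
--     for i, arr in enumerate(nums):
--         heap.append((arr.pop(0), i))
--     heapq.heapify(heap)  # 将heap转换成最小堆
--
--     result = []
--     while heap:
--         value, index = heapq.heappop(heap)  # 将堆顶层元素出堆
--         result.append(value)  # 将顶层元素追加
--         # 根据索引获取对应array的剩余元素
--         if nums[index]:
--             # 如果存在下一个元素,则将该元素及索引入堆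
--             heapq.heappush(heap, (nums[index].pop(0), index))
--     return result
-- ===== SOURCE B (Python) =====
-- from typing import List
--
--
-- def sortNArray2(nums: List[List[int]]) -> List:
--     # Selection merge with per-array index pointers: no heap, no pop(0),
--     # and (unlike A) no mutation of the input arrays.
--     ptrs = [0] * len(nums)
--     result = []
--     while True:
--         best = None
--         for i, p in enumerate(ptrs):
--             if p < len(nums[i]):
--                 cand = (nums[i][p], i)
--                 if best is None or cand < best:
--                     best = cand
--         if best is None:
--             return result
--         result.append(best[0])
--         ptrs[best[1]] += 1
-- ===== Notes on version B (the rewrite author's own statement) =====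
-- stated objective: alternative
-- what changed: Replaces the heapq-plus-destructive-pop(0) merge with a non-mutating selection merge that keeps one index pointer per array and picks the lexicographically least (front value, array index) by a linear scan each round.
import Mathlib
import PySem

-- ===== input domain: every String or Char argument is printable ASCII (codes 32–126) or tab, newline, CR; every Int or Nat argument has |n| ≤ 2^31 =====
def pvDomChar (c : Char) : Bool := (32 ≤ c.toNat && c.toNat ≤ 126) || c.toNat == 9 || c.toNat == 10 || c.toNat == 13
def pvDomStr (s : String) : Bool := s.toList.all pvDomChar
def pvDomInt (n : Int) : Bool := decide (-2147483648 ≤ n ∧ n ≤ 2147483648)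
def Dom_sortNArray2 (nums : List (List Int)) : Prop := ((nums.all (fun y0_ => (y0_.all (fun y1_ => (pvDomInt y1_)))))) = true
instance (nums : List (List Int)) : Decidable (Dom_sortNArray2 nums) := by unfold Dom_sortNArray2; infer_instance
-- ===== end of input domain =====

-- B replaces A's heapq merge (which destructively pop(0)s the input arrays) by a
-- non-mutating pointer-based selection merge; equivalence is about the return value
-- (A mutates nums in place, B does not).

-- ===== PORT A =====
-- Python tuple order on (value, index); the index is modelled as a Nat (it is always a
-- nonnegative Python int, so Nat comparison is exact).
def pvPairLt (p q : Int × Nat) : Bool := p.1 < q.1 || (p.1 == q.1 && decide (p.2 < q.2))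

def pvMinAux (acc : Int × Nat) : List (Int × Nat) → Int × Nat
  | [] => acc
  | p :: l => pvMinAux (if pvPairLt p acc then p else acc) l

-- heapq is modelled by its observable behaviour: heappush adds an element, heappop removes
-- the least element in tuple order. Exact here because heap elements always carry pairwise
-- distinct array indices, so the minimum is unique and the heap's internal array layout
-- can never influence the popped sequence.
def pvHeapPop : List (Int × Nat) → Option ((Int × Nat) × List (Int × Nat))
  | [] => none
  | a :: l => some (pvMinAux a l, (a :: l).erase (pvMinAux a l))

-- `for i, arr in enumerate(nums): heap.append((arr.pop(0), i))`; none = IndexError (empty arr)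
def pvInitA (i : Nat) : List (List Int) → Option (List (Int × Nat) × List (List Int))
  | [] => some ([], [])
  | [] :: _ => none
  | (v :: t) :: rest =>
    match pvInitA (i + 1) rest with
    | none => none
    | some (h, r) => some ((v, i) :: h, t :: r)

-- the while loop; fuel = number of elements still to be output (exact, see pvFuelEq below)
def pvLoopA (fuel : Nat) (heap : List (Int × Nat)) (rest : List (List Int)) : List Int :=
  match fuel with
  | 0 => []
  | fuel + 1 =>
    match pvHeapPop heap with
    | none => []
    | some ((v, i), heap') =>
      match rest.getD i [] with
      | [] => v :: pvLoopA fuel heap' rest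
      | w :: t => v :: pvLoopA fuel (heap' ++ [(w, i)]) (rest.set i t)

def sortNArray2 (nums : List (List Int)) : List Int :=
  match pvInitA 0 nums with
  | none => []  -- Python raises IndexError here; excluded by Pre_sortNArray2
  | some (heap, rest) => pvLoopA (heap.length + (rest.map List.length).sum) heap rest

-- ===== PORT B =====
-- the inner `for i, p in enumerate(ptrs)` scan carrying `best`
def pvScanB (nums : List (List Int)) (best : Option (Int × Nat)) : List (Nat × Nat) → Option (Int × Nat)
  | [] => best
  | (i, p) :: ips =>
    match (nums.getD i [])[p]? with
    | none => pvScanB nums best ips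
    | some v =>
      match best with
      | none => pvScanB nums (some (v, i)) ips
      | some b => pvScanB nums (some (if pvPairLt (v, i) b then (v, i) else b)) ips

def pvEnum (i : Nat) : List Nat → List (Nat × Nat)
  | [] => []
  | p :: ps => (i, p) :: pvEnum (i + 1) ps

def pvLoopB (nums : List (List Int)) (fuel : Nat) (ptrs : List Nat) : List Int :=
  match fuel with
  | 0 => []
  | fuel + 1 =>
    match pvScanB nums none (pvEnum 0 ptrs) with
    | none => []
    | some (v, i) => v :: pvLoopB nums fuel (ptrs.set i (ptrs.getD i 0 + 1))

def sortNArray2_alt (nums : List (List Int)) : List Int :=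
  pvLoopB nums ((nums.map List.length).sum) (List.replicate nums.length 0)

-- ===== PRECONDITION & SPEC =====
-- A does arr.pop(0) on every inner array, so it raises IndexError as soon as one is empty.
def Pre_sortNArray2 (nums : List (List Int)) : Prop := ∀ a ∈ nums, a ≠ []
instance (nums : List (List Int)) : Decidable (Pre_sortNArray2 nums) := by
  unfold Pre_sortNArray2; infer_instance

def pvWitness_sortNArray2 : List (List Int) := [[1, 3], [2], [0, 5]]

def Spec_sortNArray2 (nums : List (List Int)) (out : List Int) : Prop := out = sortNArray2_alt nums
instance (nums : List (List Int)) (out : List Int) : Decidable (Spec_sortNArray2 nums out) := by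
  unfold Spec_sortNArray2; infer_instance

-- ===== CLAIM (what is proved, stated in full; the proofs are below) =====
def Claim_equal_sortNArray2 : Prop := ∀ (nums : List (List Int)), Dom_sortNArray2 nums → Pre_sortNArray2 nums → Spec_sortNArray2 nums (sortNArray2 nums)


-- ===== LEMMAS AND PROOFS =====

-- the abstract state both loops are about: the list of current fronts (value, array index)
-- and the list of tails behind those fronts
def pvCands (i : Nat) (ts : List (List Int)) : List Nat → List (Int × Nat)
  | [] => []
  | p :: ps =>
    match (ts.headD [])[p]? with
    | none => pvCands (i + 1) ts.tail ps
    | some v => (v, i) :: pvCands (i + 1) ts.tail ps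

def pvRests (ts : List (List Int)) : List Nat → List (List Int)
  | [] => []
  | p :: ps => (ts.headD []).drop (p + 1) :: pvRests ts.tail ps

def pvStep (b : Option (Int × Nat)) (c : Int × Nat) : Option (Int × Nat) :=
  match b with
  | none => some c
  | some b => some (if pvPairLt c b then c else b)

-- strict total order facts for pvPairLt
lemma pvLt_irrefl (a : Int × Nat) : pvPairLt a a = false := by
  obtain ⟨a1, a2⟩ := a; simp [pvPairLt]

lemma pvLt_trans {a b c : Int × Nat} (h1 : pvPairLt a b = true) (h2 : pvPairLt b c = true) :
    pvPairLt a c = true := by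
  obtain ⟨a1, a2⟩ := a; obtain ⟨b1, b2⟩ := b; obtain ⟨c1, c2⟩ := c
  simp only [pvPairLt, Bool.or_eq_true, Bool.and_eq_true, decide_eq_true_eq, beq_iff_eq] at *
  omega

lemma pvLe_lt_trans {a b c : Int × Nat} (h1 : pvPairLt b a = false) (h2 : pvPairLt b c = true) :
    pvPairLt a c = true := by
  obtain ⟨a1, a2⟩ := a; obtain ⟨b1, b2⟩ := b; obtain ⟨c1, c2⟩ := c
  simp only [pvPairLt, Bool.or_eq_false_iff, Bool.or_eq_true, Bool.and_eq_false_iff,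
    Bool.and_eq_true, decide_eq_true_eq, decide_eq_false_iff_not, beq_iff_eq,
    beq_eq_false_iff_ne] at *
  omega

lemma pvLt_conn {a b : Int × Nat} (h1 : pvPairLt a b = false) (h2 : pvPairLt b a = false) :
    a = b := by
  obtain ⟨a1, a2⟩ := a; obtain ⟨b1, b2⟩ := b
  simp only [pvPairLt, Bool.or_eq_false_iff, Bool.and_eq_false_iff,
    decide_eq_false_iff_not, beq_eq_false_iff_ne] at *
  have : a1 = b1 ∧ a2 = b2 := by omega
  simp [this.1, this.2]

def pvIsMin (l : List (Int × Nat)) (m : Int × Nat) : Prop :=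
  m ∈ l ∧ ∀ p ∈ l, pvPairLt p m = false

lemma pvMinAux_mem : ∀ (l : List (Int × Nat)) (a : Int × Nat), pvMinAux a l ∈ a :: l := by
  intro l
  induction l with
  | nil => intro a; simp [pvMinAux]
  | cons p l ih =>
    intro a
    simp only [pvMinAux]
    rcases List.mem_cons.1 (ih (if pvPairLt p a then p else a)) with h | h
    · rw [h]; split_ifs <;> simp
    · simp [h]

lemma pvMinAux_min : ∀ (l : List (Int × Nat)) (a q : Int × Nat), q ∈ a :: l →
    pvPairLt q (pvMinAux a l) = false := by
  intro l
  induction l with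
  | nil =>
    intro a q hq
    simp at hq; subst hq; simp [pvMinAux, pvLt_irrefl]
  | cons p l ih =>
    intro a q hq
    simp only [pvMinAux]
    set acc := if pvPairLt p a = true then p else a with hacc
    have haccmin : pvPairLt acc (pvMinAux acc l) = false := ih acc acc List.mem_cons_self
    by_cases hpa : pvPairLt p a = true
    · have hacc' : acc = p := by rw [hacc, if_pos hpa]
      rcases List.mem_cons.1 hq with rfl | hq'
      · by_contra hc
        have h1 : pvPairLt q (pvMinAux acc l) = true := by
          revert hc; cases pvPairLt q (pvMinAux acc l) <;> simp
        have h2 := pvLt_trans hpa h1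
        rw [hacc'] at haccmin h2
        rw [haccmin] at h2; exact Bool.false_ne_true h2
      · rcases List.mem_cons.1 hq' with rfl | hmem
        · rw [hacc']; exact hacc' ▸ haccmin
        · exact ih acc q (List.mem_cons_of_mem _ hmem)
    · have hne : pvPairLt p a = false := by revert hpa; cases pvPairLt p a <;> simp
      have hacc' : acc = a := by rw [hacc, if_neg hpa]
      rcases List.mem_cons.1 hq with rfl | hq'
      · exact hacc' ▸ haccmin
      · rcases List.mem_cons.1 hq' with rfl | hmem
        · by_contra hc
          have h1 : pvPairLt q (pvMinAux acc l) = true := by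
            revert hc; cases pvPairLt q (pvMinAux acc l) <;> simp
          have h2 := pvLe_lt_trans hne h1
          rw [hacc'] at haccmin h2
          rw [haccmin] at h2; exact Bool.false_ne_true h2
        · exact ih acc q (List.mem_cons_of_mem _ hmem)

lemma pvMinAux_isMin (l : List (Int × Nat)) (a : Int × Nat) : pvIsMin (a :: l) (pvMinAux a l) :=
  ⟨pvMinAux_mem l a, fun q hq => pvMinAux_min l a q hq⟩

lemma pvIsMin_unique {l₁ l₂ : List (Int × Nat)} {m₁ m₂ : Int × Nat}
    (hp : l₁.Perm l₂) (h1 : pvIsMin l₁ m₁) (h2 : pvIsMin l₂ m₂) : m₁ = m₂ :=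
  pvLt_conn (h2.2 _ (hp.mem_iff.1 h1.1)) (h1.2 _ (hp.mem_iff.2 h2.1))

lemma pvFoldStep_some : ∀ (l : List (Int × Nat)) (a : Int × Nat),
    List.foldl pvStep (some a) l = some (pvMinAux a l) := by
  intro l
  induction l with
  | nil => intro a; rfl
  | cons p l ih => intro a; simp only [List.foldl, pvStep, pvMinAux]; rw [ih]

lemma pvScanB_eq_fold (nums : List (List Int)) :
    ∀ (ps : List Nat) (i : Nat) (best : Option (Int × Nat)),
      pvScanB nums best (pvEnum i ps) = List.foldl pvStep best (pvCands i (nums.drop i) ps) := by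
  intro ps
  induction ps with
  | nil => intro i best; rfl
  | cons p ps ih =>
    intro i best
    have hhead : (nums.drop i).headD [] = nums.getD i [] := by
      rw [List.headD_eq_head? _ _, List.head?_drop, List.getD_eq_getElem?_getD]
    have htail : (nums.drop i).tail = nums.drop (i + 1) := by
      rw [← List.drop_drop, ← List.drop_one]
    simp only [pvEnum, pvScanB, pvCands, hhead, htail]
    cases h : (nums.getD i [])[p]? with
    | none => simp [ih]
    | some v =>
      cases best with
      | none => simp [ih, List.foldl, pvStep]
      | some b => simp [ih, List.foldl, pvStep]

-- decomposition of the candidate list around one of its members, together with the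
-- effect of bumping that member's pointer
lemma pvCands_decomp : ∀ (ps : List Nat) (ts : List (List Int)) (i : Nat) (m : Int × Nat),
    m ∈ pvCands i ts ps →
    ∃ k, k < ps.length ∧ m.2 = i + k ∧
      ((ts.drop k).headD [])[ps.getD k 0]? = some m.1 ∧
      ∃ X Y,
        pvCands i ts ps = X ++ m :: Y ∧
        (∀ q ∈ X, q.2 < m.2) ∧
        pvCands i ts (ps.set k (ps.getD k 0 + 1)) =
          X ++ (((ts.drop k).headD [])[ps.getD k 0 + 1]?.map (fun w => (w, m.2))).toList ++ Y := by
  intro ps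
  induction ps with
  | nil => intro ts i m h; simp [pvCands] at h
  | cons p ps ih =>
    intro ts i m h
    simp only [pvCands] at h
    cases hh : (ts.headD [])[p]? with
    | none =>
      rw [hh] at h
      obtain ⟨k, hk, hm2, hfront, X, Y, hdec, hX, hset⟩ := ih ts.tail (i + 1) m h
      have hdrop : ∀ j : Nat, (ts.tail.drop j) = ts.drop (j + 1) := by
        intro j; rw [← List.drop_one, List.drop_drop, Nat.add_comm]
      refine ⟨k + 1, by simpa using hk, by omega, ?_, X, Y, ?_, hX, ?_⟩
      · rw [← hdrop k]; simpa using hfront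
      · simp only [pvCands, hh]; exact hdec
      · simp only [List.set_cons_succ, pvCands, hh, List.getD_cons_succ]
        rw [← hdrop k]; simpa using hset
    | some v =>
      rw [hh] at h
      rcases List.mem_cons.1 h with hm | hm
      · subst hm
        refine ⟨0, by simp, by simp, by simpa using hh, [], pvCands (i + 1) ts.tail ps,
          by simp only [pvCands, hh, List.nil_append], by simp, ?_⟩
        simp only [List.set_cons_zero, pvCands, List.getD_cons_zero, List.drop_zero]
        cases (ts.headD [])[p + 1]? <;> simp
      · obtain ⟨k, hk, hm2, hfront, X, Y, hdec, hX, hset⟩ := ih ts.tail (i + 1) m hm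
        have hdrop : ∀ j : Nat, (ts.tail.drop j) = ts.drop (j + 1) := by
          intro j; rw [← List.drop_one, List.drop_drop, Nat.add_comm]
        refine ⟨k + 1, by simpa using hk, by omega, ?_, (v, i) :: X, Y, ?_, ?_, ?_⟩
        · rw [← hdrop k]; simpa using hfront
        · simp only [pvCands, hh]; rw [hdec]; rfl
        · intro q hq
          rcases List.mem_cons.1 hq with h | h
          · subst h; omega
          · exact hX q h
        · simp only [List.set_cons_succ, pvCands, hh, List.getD_cons_succ]
          rw [← hdrop k]
          rw [hset]; rfl

lemma pvRests_length : ∀ (ps : List Nat) (ts : List (List Int)),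
    (pvRests ts ps).length = ps.length := by
  intro ps
  induction ps with
  | nil => intro ts; rfl
  | cons p ps ih => intro ts; simp [pvRests, ih]

lemma pvRests_getD : ∀ (ps : List Nat) (ts : List (List Int)) (k : Nat), k < ps.length →
    (pvRests ts ps).getD k [] = ((ts.drop k).headD []).drop (ps.getD k 0 + 1) := by
  intro ps
  induction ps with
  | nil => intro ts k h; simp at h
  | cons p ps ih =>
    intro ts k hk
    cases k with
    | zero => simp [pvRests]
    | succ k =>
      simp only [pvRests, List.getD_cons_succ]
      rw [ih ts.tail k (by simpa using hk)]
      rw [show ts.tail.drop k = ts.drop (k + 1) by rw [← List.drop_one, List.drop_drop, Nat.add_comm]]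

lemma pvRests_set : ∀ (ps : List Nat) (ts : List (List Int)) (k q : Nat), k < ps.length →
    pvRests ts (ps.set k q) = (pvRests ts ps).set k (((ts.drop k).headD []).drop (q + 1)) := by
  intro ps
  induction ps with
  | nil => intro ts k q h; simp at h
  | cons p ps ih =>
    intro ts k q hk
    cases k with
    | zero => simp [pvRests]
    | succ k =>
      simp only [List.set_cons_succ, pvRests]
      rw [ih ts.tail k q (by simpa using hk)]
      rw [show ts.tail.drop k = ts.drop (k + 1) by rw [← List.drop_one, List.drop_drop, Nat.add_comm]]

-- the main loop correspondence
lemma pvLoop_eq (nums : List (List Int)) :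
    ∀ (fuel : Nat) (heap : List (Int × Nat)) (ptrs : List Nat),
      heap.Perm (pvCands 0 nums ptrs) →
      pvLoopA fuel heap (pvRests nums ptrs) = pvLoopB nums fuel ptrs := by
  intro fuel
  induction fuel with
  | zero => intro heap ptrs _; rfl
  | succ fuel ih =>
    intro heap ptrs hperm
    have hscan : pvScanB nums none (pvEnum 0 ptrs) =
        List.foldl pvStep none (pvCands 0 nums ptrs) := by
      simpa using pvScanB_eq_fold nums ptrs 0 none
    cases hheap : heap with
    | nil =>
      have hcnil : pvCands 0 nums ptrs = [] := by
        have := hheap ▸ hperm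
        exact this.nil_eq.symm
      simp only [pvLoopA, pvLoopB, pvHeapPop, hscan, hcnil, List.foldl]
    | cons a l =>
      subst hheap
      cases hcands : pvCands 0 nums ptrs with
      | nil => exact absurd (hcands ▸ hperm) (by simp)
      | cons c cs =>
        -- both sides select the unique minimum m of the candidate multiset
        set m := pvMinAux a l with hm
        have hmin1 : pvIsMin (a :: l) m := pvMinAux_isMin l a
        have hmin2 : pvIsMin (c :: cs) (pvMinAux c cs) := pvMinAux_isMin cs c
        have hmeq : m = pvMinAux c cs := pvIsMin_unique (hcands ▸ hperm) hmin1 hmin2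
        have hscan' : pvScanB nums none (pvEnum 0 ptrs) = some m := by
          rw [hscan, hcands]; simp only [List.foldl, pvStep]
          rw [pvFoldStep_some, hmeq]
        have hmem : m ∈ pvCands 0 nums ptrs := (hperm.mem_iff).1 hmin1.1
        obtain ⟨k, hk, hm2, hfront, X, Y, hdec, hX, hset⟩ := pvCands_decomp ptrs nums 0 m hmem
        have hm2' : m.2 = k := by omega
        have hmX : m ∉ X := fun hmx => absurd (hX m hmx) (lt_irrefl _)
        have herase : (pvCands 0 nums ptrs).erase m = X ++ Y := by
          rw [hdec, List.erase_append_right _ hmX, List.erase_cons_head]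
        have hperm' : ((a :: l).erase m).Perm (X ++ Y) := herase ▸ hperm.erase m
        -- A's view of the tail behind m's front
        have hrest : (pvRests nums ptrs).getD m.2 [] =
            ((nums.drop k).headD []).drop (ptrs.getD k 0 + 1) := by
          rw [hm2', pvRests_getD ptrs nums k hk]
        -- unfold one step of both loops
        simp only [pvLoopA, pvLoopB, pvHeapPop, hscan']
        rw [hrest]
        have hnext : (((nums.drop k).headD []).drop (ptrs.getD k 0 + 1)).head? =
            ((nums.drop k).headD [])[ptrs.getD k 0 + 1]? := List.head?_drop
        cases hdropc : ((nums.drop k).headD []).drop (ptrs.getD k 0 + 1) with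
        | nil =>
          -- array exhausted: A pushes nothing, B's bump leaves an empty front
          have hnone : ((nums.drop k).headD [])[ptrs.getD k 0 + 1]? = none := by
            rw [← hnext, hdropc]; rfl
          have hcset : pvCands 0 nums (ptrs.set k (ptrs.getD k 0 + 1)) = X ++ Y := by
            rw [hset, hnone]; simp
          have hlen : k < (pvRests nums ptrs).length := by rw [pvRests_length]; exact hk
          have hentry : (pvRests nums ptrs)[k] = [] := by
            have hgd := pvRests_getD ptrs nums k hk
            rw [List.getD_eq_getElem?_getD, List.getElem?_eq_getElem hlen, Option.getD_some] at hgd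
            rw [hgd, hdropc]
          have hrests' : pvRests nums (ptrs.set k (ptrs.getD k 0 + 1)) = pvRests nums ptrs := by
            rw [pvRests_set ptrs nums k _ hk, ← List.tail_drop, hdropc]
            simp only [List.tail_nil]
            rw [← hentry, List.set_getElem_self]
          rw [← hm2'] at hcset hrests'
          have hrec := ih ((a :: l).erase m) (ptrs.set m.2 (ptrs.getD m.2 0 + 1))
            (by rw [hcset]; exact hperm')
          rw [hrests'] at hrec
          exact congrArg (List.cons m.1) hrec
        | cons w t =>
          -- next element of that array enters
          have hsome : ((nums.drop k).headD [])[ptrs.getD k 0 + 1]? = some w := by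
            rw [← hnext, hdropc]; rfl
          have hcset : pvCands 0 nums (ptrs.set k (ptrs.getD k 0 + 1)) =
              X ++ (w, m.2) :: Y := by
            rw [hset, hsome]; simp
          have hpermNew : (((a :: l).erase m) ++ [(w, m.2)]).Perm
              (pvCands 0 nums (ptrs.set k (ptrs.getD k 0 + 1))) := by
            rw [hcset]
            refine (hperm'.append_right _).trans ?_
            rw [List.append_assoc]
            exact List.Perm.append_left X (List.perm_append_singleton _ _)
          have hrests' : pvRests nums (ptrs.set k (ptrs.getD k 0 + 1)) =
              (pvRests nums ptrs).set k t := by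
            rw [pvRests_set ptrs nums k _ hk, ← List.tail_drop, hdropc]
            rfl
          rw [← hm2'] at hpermNew hrests'
          have hrec := ih (((a :: l).erase m) ++ [(w, m.2)])
            (ptrs.set m.2 (ptrs.getD m.2 0 + 1)) hpermNew
          rw [hrests'] at hrec
          exact congrArg (List.cons m.1) hrec

lemma pvInit_spec : ∀ (nums : List (List Int)) (i : Nat), (∀ a ∈ nums, a ≠ []) →
    pvInitA i nums = some (pvCands i nums (List.replicate nums.length 0),
                           pvRests nums (List.replicate nums.length 0)) := by
  intro nums
  induction nums with
  | nil => intro i _; rfl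
  | cons a nums ih =>
    intro i hne
    obtain ⟨v, t, rfl⟩ : ∃ v t, a = v :: t := by
      cases a with
      | nil => exact absurd rfl (hne [] List.mem_cons_self)
      | cons v t => exact ⟨v, t, rfl⟩
    simp only [pvInitA, List.length_cons, List.replicate_succ]
    rw [ih (i + 1) (fun b hb => hne b (List.mem_cons_of_mem _ hb))]
    simp [pvCands, pvRests]

lemma pvFuelEq : ∀ (nums : List (List Int)) (i : Nat), (∀ a ∈ nums, a ≠ []) →
    (pvCands i nums (List.replicate nums.length 0)).length +
      ((pvRests nums (List.replicate nums.length 0)).map List.length).sum =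
      (nums.map List.length).sum := by
  intro nums
  induction nums with
  | nil => intro i _; rfl
  | cons a nums ih =>
    intro i hne
    obtain ⟨v, t, rfl⟩ : ∃ v t, a = v :: t := by
      cases a with
      | nil => exact absurd rfl (hne [] List.mem_cons_self)
      | cons v t => exact ⟨v, t, rfl⟩
    have := ih (i + 1) (fun b hb => hne b (List.mem_cons_of_mem _ hb))
    simp only [List.length_cons, List.replicate_succ, pvCands, pvRests, List.map_cons,
      List.sum_cons] at *
    simp only [List.headD_cons, List.getElem?_cons_zero, List.tail_cons, List.drop_succ_cons,
      List.drop_zero, List.length_cons]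
    omega

-- ===== VERDICT (by name: the statement is the Claim_ definition above) =====
theorem sortNArray2_spec : Claim_equal_sortNArray2 := by
  intro nums _ hpre
  unfold Spec_sortNArray2 sortNArray2 sortNArray2_alt
  rw [pvInit_spec nums 0 hpre]
  simp only
  rw [pvFuelEq nums 0 hpre]
  exact pvLoop_eq nums _ _ _ (List.Perm.refl _)
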